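-- pv_equiv track=rewrite | github.com/Carmen-Carmen/coursera_bioinformatics | Bioinformatics_III_comparing_genes_proteins_and_genomes/week_5/week5.py | get_colored_edges
-- ===== SOURCE A (Python) =====
-- def transfer_chromosome_to_cycle(chromosome):
--     nodes = [0 for _ in range(2 * len(chromosome))]
--     for i in range(len(chromosome)):
--         val = chromosome[i]
--         # if i = 0, then the adjacent index in list nodes should be 0 and 1
--         if val > 0:
--             nodes[2 * i] = 2 * val - 1
--             nodes[2 * i + 1] = 2 * val
--         if val < 0:
--             nodes[2 * i] = -(2 * val)
--             nodes[2 * i + 1] = -(2 * val) - 1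
--
--     return nodes
--
-- def get_colored_edges(genome):
--     edges = []
--     for chromosome in genome:
--         nodes = transfer_chromosome_to_cycle(chromosome)
--         # assume that an n-element array (a1, . . . , an) has an
--         # invisible (n + 1)-th element that is equal to its first element
--         nodes.append(nodes[0])
--         for i in range(len(chromosome)):
--             starting_node = nodes[2 * i + 1]
--             ending_node = nodes[2 * i + 2]
--             edges.append((starting_node, ending_node))
--
--     return edges
-- ===== SOURCE B (Python) =====
-- def get_colored_edges(genome):
--     def tail(v):
--         return 2 * v if v > 0 else (-2 * v - 1 if v < 0 else 0)
--
--     def head(v):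
--         return 2 * v - 1 if v > 0 else (-2 * v if v < 0 else 0)
--
--     edges = []
--     for chromosome in genome:
--         edges.extend((tail(u), head(w))
--                      for u, w in zip(chromosome, chromosome[1:] + chromosome[:1]))
--     return edges
-- ===== Notes on version B (the rewrite author's own statement) =====
-- stated objective: simpler
-- what changed: B drops the intermediate doubled-nodes array entirely: it pairs each gene with its circular successor (zip of the chromosome with its rotation) and emits (tail(gene), head(successor)) directly via inline head/tail formulas.
import Mathlib
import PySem

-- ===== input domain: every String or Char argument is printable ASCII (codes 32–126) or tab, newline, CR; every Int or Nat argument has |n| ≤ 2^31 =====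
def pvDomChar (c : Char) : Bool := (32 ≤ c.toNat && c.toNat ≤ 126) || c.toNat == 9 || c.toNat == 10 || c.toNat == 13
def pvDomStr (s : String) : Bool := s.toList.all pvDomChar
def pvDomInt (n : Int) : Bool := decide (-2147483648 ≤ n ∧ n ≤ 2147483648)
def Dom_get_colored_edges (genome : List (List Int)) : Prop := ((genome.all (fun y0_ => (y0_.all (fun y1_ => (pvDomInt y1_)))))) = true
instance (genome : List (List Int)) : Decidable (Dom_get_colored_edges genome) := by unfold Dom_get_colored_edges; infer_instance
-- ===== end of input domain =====

-- B drops the intermediate doubled-nodes array: it pairs each gene with its circular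
-- successor and emits (tail, head) edges directly (objective: simpler decomposition).
-- A raises IndexError on a genome containing an empty chromosome; such genomes are
-- excluded by Pre_.

-- ===== PORT A =====
def transfer_chromosome_to_cycle (chromosome : List Int) : List Int :=
  (List.range chromosome.length).foldl (fun nodes i =>
    let val := PySem.List.pyGetD chromosome (Int.ofNat i) 0
    let nodes1 :=
      if val > 0 then
        PySem.List.pySetD (PySem.List.pySetD nodes (Int.ofNat (2*i)) (2*val - 1)) (Int.ofNat (2*i+1)) (2*val)
      else nodes
    if val < 0 then
      PySem.List.pySetD (PySem.List.pySetD nodes1 (Int.ofNat (2*i)) (-(2*val))) (Int.ofNat (2*i+1)) (-(2*val) - 1)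
    else nodes1)
    (List.replicate (2 * chromosome.length) 0)

def get_colored_edges (genome : List (List Int)) : List (Int × Int) :=
  genome.foldl (fun edges chromosome =>
    let nodes := transfer_chromosome_to_cycle chromosome
    -- nodes.append(nodes[0]): nodes[0] raises IndexError on an empty chromosome (outside Pre_)
    let nodes2 := nodes ++ [PySem.List.pyGetD nodes 0 0]
    (List.range chromosome.length).foldl (fun edges i =>
      edges ++ [(PySem.List.pyGetD nodes2 (Int.ofNat (2*i+1)) 0,
                 PySem.List.pyGetD nodes2 (Int.ofNat (2*i+2)) 0)]) edges) []

-- ===== PORT B =====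
def gce_tail (v : Int) : Int := if v > 0 then 2*v else if v < 0 then -2*v - 1 else 0
def gce_head (v : Int) : Int := if v > 0 then 2*v - 1 else if v < 0 then -2*v else 0

def get_colored_edges_alt (genome : List (List Int)) : List (Int × Int) :=
  genome.foldl (fun edges chromosome =>
    edges ++
      ((chromosome.zip
          (PySem.List.slice chromosome (some 1) none ++ PySem.List.slice chromosome none (some 1))).map
        (fun p => (gce_tail p.1, gce_head p.2)))) []

-- ===== PRECONDITION & SPEC =====
-- Pre_ excludes genomes containing an empty chromosome: there A raises IndexError at nodes[0].
def Pre_get_colored_edges (genome : List (List Int)) : Prop :=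
  ∀ c ∈ genome, c ≠ []
instance (genome : List (List Int)) : Decidable (Pre_get_colored_edges genome) := by
  unfold Pre_get_colored_edges; infer_instance

def pvWitness_get_colored_edges : List (List Int) := [[1, -2, 3], [-4]]

def Spec_get_colored_edges (genome : List (List Int)) (out : List (Int × Int)) : Prop :=
  out = get_colored_edges_alt genome
instance (genome : List (List Int)) (out : List (Int × Int)) : Decidable (Spec_get_colored_edges genome out) := by
  unfold Spec_get_colored_edges; infer_instance

-- ===== CLAIM (what is proved, stated in full; the proofs are below) =====
def Claim_equal_get_colored_edges : Prop := ∀ (genome : List (List Int)), Dom_get_colored_edges genome → Pre_get_colored_edges genome → Spec_get_colored_edges genome (get_colored_edges genome)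


-- ===== LEMMAS AND PROOFS =====

-- A's per-gene node pair: [head, tail]
def gce_pair (v : Int) : List Int := [gce_head v, gce_tail v]

lemma tcc_loop (cs : List Int) :
    ∀ (m k : ℕ), cs.length - k = m → k ≤ cs.length → ∀ (pre : List Int), pre.length = 2 * k →
    (List.range' k m).foldl (fun nodes i =>
      let val := PySem.List.pyGetD cs (Int.ofNat i) 0
      let nodes1 :=
        if val > 0 then
          PySem.List.pySetD (PySem.List.pySetD nodes (Int.ofNat (2*i)) (2*val - 1)) (Int.ofNat (2*i+1)) (2*val)
        else nodes
      if val < 0 then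
        PySem.List.pySetD (PySem.List.pySetD nodes1 (Int.ofNat (2*i)) (-(2*val))) (Int.ofNat (2*i+1)) (-(2*val) - 1)
      else nodes1)
      (pre ++ List.replicate (2 * m) 0)
    = pre ++ (cs.drop k).flatMap gce_pair := by
  intro m
  induction m with
  | zero =>
    intro k hm hk pre hpre
    have hd : cs.drop k = [] := List.drop_eq_nil_iff.mpr (by omega)
    simp [hd]
  | succ n ih =>
    intro k hm hk pre hpre
    have hklt : k < cs.length := by omega
    have hrep : List.replicate (2 * (n+1)) (0 : Int) = 0 :: 0 :: List.replicate (2*n) 0 := by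
      have h2 : 2 * (n+1) = (2*n) + 1 + 1 := by omega
      rw [h2, List.replicate_succ, List.replicate_succ]
    have hval : PySem.List.pyGetD cs (Int.ofNat k) 0 = cs.getD k 0 := by
      simp
    rw [List.range'_succ, List.foldl_cons, hrep]
    have hdrop : cs.drop k = cs.getD k 0 :: cs.drop (k+1) := by rw [List.drop_eq_getElem_cons hklt, List.getD_eq_getElem cs 0 hklt]
    have hset : ∀ (a b : Int),
        ((pre ++ 0 :: 0 :: List.replicate (2*n) (0:Int)).set (2*k) a).set (2*k+1) b
          = (pre ++ [a, b]) ++ List.replicate (2*n) 0 := by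
      intro a b
      rw [List.set_append_right _ _ (by omega), List.set_append_right _ _ (by omega)]
      simp [hpre]
    have hmain : (let val := PySem.List.pyGetD cs (Int.ofNat k) 0
        let nodes1 :=
          if val > 0 then
            PySem.List.pySetD (PySem.List.pySetD (pre ++ 0 :: 0 :: List.replicate (2*n) 0) (Int.ofNat (2*k)) (2*val - 1)) (Int.ofNat (2*k+1)) (2*val)
          else pre ++ 0 :: 0 :: List.replicate (2*n) 0
        if val < 0 then
          PySem.List.pySetD (PySem.List.pySetD nodes1 (Int.ofNat (2*k)) (-(2*val))) (Int.ofNat (2*k+1)) (-(2*val) - 1)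
        else nodes1)
        = (pre ++ gce_pair (cs.getD k 0)) ++ List.replicate (2*n) 0 := by
      have hgv : cs[k]?.getD 0 = cs.getD k 0 := by simp [List.getD]
      simp only [Int.ofNat_eq_natCast, PySem.List.pyGetD_natCast, PySem.List.pySetD_natCast,
        gce_pair, gce_head, gce_tail, gt_iff_lt]
      rcases lt_trichotomy (cs.getD k 0) 0 with hv | hv | hv
      · simp only [if_pos hv, if_neg (by omega : ¬ (0 : Int) < cs.getD k 0)]
        simpa using hset _ _
      · simp only [hv]
        simp
      · simp only [if_pos hv, if_neg (by omega : ¬ cs.getD k 0 < 0)]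
        simpa using hset _ _
    rw [hmain, ih (k+1) (by omega) (by omega) (pre ++ gce_pair (cs.getD k 0)) (by simp [gce_pair]; omega),
        hdrop]
    simp [gce_pair]

lemma tcc_eq (cs : List Int) :
    transfer_chromosome_to_cycle cs = cs.flatMap gce_pair := by
  unfold transfer_chromosome_to_cycle
  have h := tcc_loop cs cs.length 0 rfl (by omega) [] rfl
  simpa [List.range_eq_range'] using h

lemma len_flatMap_pair (cs : List Int) : (cs.flatMap gce_pair).length = 2 * cs.length := by
  induction cs with
  | nil => simp
  | cons x xs ih => simp [gce_pair] at ih ⊢; omega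

lemma flatMap_pair_getD (cs : List Int) :
    ∀ (i : ℕ), i < cs.length →
      (cs.flatMap gce_pair).getD (2*i) 0 = gce_head (cs.getD i 0) ∧
      (cs.flatMap gce_pair).getD (2*i+1) 0 = gce_tail (cs.getD i 0) := by
  induction cs with
  | nil => intro i hi; simp at hi
  | cons x xs ih =>
    intro i hi
    cases i with
    | zero => simp [gce_pair]
    | succ j =>
      have hj : j < xs.length := by simpa using hi
      have e1 : 2 * (j+1) = (2*j) + 1 + 1 := by omega
      rw [e1]
      simpa [gce_pair] using ih j hj

lemma chrom_eq (cs : List Int) (hc : cs ≠ []) (edges : List (Int × Int)) :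
    (let nodes := transfer_chromosome_to_cycle cs
     let nodes2 := nodes ++ [PySem.List.pyGetD nodes 0 0]
     (List.range cs.length).foldl (fun edges i =>
       edges ++ [(PySem.List.pyGetD nodes2 (Int.ofNat (2*i+1)) 0,
                  PySem.List.pyGetD nodes2 (Int.ofNat (2*i+2)) 0)]) edges)
    = edges ++
      ((cs.zip (PySem.List.slice cs (some 1) none ++ PySem.List.slice cs none (some 1))).map
        (fun p => (gce_tail p.1, gce_head p.2))) := by
  have hn : 0 < cs.length := List.length_pos_iff.mpr hc
  have hslice : PySem.List.slice cs (some 1) none ++ PySem.List.slice cs none (some 1)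
      = cs.drop 1 ++ cs.take 1 := by
    rw [PySem.List.slice_from_one, PySem.List.slice_to cs (by omega : (0:Int) ≤ 1)]
    simp
  have hN := len_flatMap_pair cs
  simp only [tcc_eq, hslice, PySem.List.foldl_append_singleton_eq_map]
  congr 1
  have hr : (cs.drop 1 ++ cs.take 1).length = cs.length := by
    simp; omega
  apply List.ext_getElem
  · simp [List.length_zip]; omega
  · intro i h1 h2
    have hi : i < cs.length := by simpa using h1
    simp only [List.getElem_map, List.getElem_range, List.getElem_zip]
    have hgetD0 : PySem.List.pyGetD (cs.flatMap gce_pair) 0 0 = gce_head (cs.getD 0 0) := by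
      rw [PySem.List.pyGetD_zero]
      simpa using (flatMap_pair_getD cs 0 hn).1
    simp only [Prod.mk.injEq]
    constructor
    · -- first component: tail of gene i
      have hlt : 2*i+1 < (cs.flatMap gce_pair).length := by omega
      have : PySem.List.pyGetD (cs.flatMap gce_pair ++ [PySem.List.pyGetD (cs.flatMap gce_pair) 0 0])
          (Int.ofNat (2*i+1)) 0 = (cs.flatMap gce_pair).getD (2*i+1) 0 := by
        simp only [Int.ofNat_eq_natCast, PySem.List.pyGetD_natCast]
        simp [List.getD, List.getElem?_append_left hlt]
      rw [this, (flatMap_pair_getD cs i hi).2, List.getD_eq_getElem cs 0 hi]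
    · -- second component: head of the circular successor
      have hsucc : (cs.drop 1 ++ cs.take 1)[i] =
          if h : i + 1 < cs.length then cs[i+1] else cs[0] := by
        split_ifs with h
        · rw [List.getElem_append_left (by simp; omega)]
          simp
        · have hi' : i = cs.length - 1 := by omega
          rw [List.getElem_append_right (by simp; omega)]
          simp [hi']
      by_cases h : i + 1 < cs.length
      · have hlt : 2*i+2 < (cs.flatMap gce_pair).length := by omega
        have : PySem.List.pyGetD (cs.flatMap gce_pair ++ [PySem.List.pyGetD (cs.flatMap gce_pair) 0 0])
            (Int.ofNat (2*i+2)) 0 = (cs.flatMap gce_pair).getD (2*i+2) 0 := by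
          simp only [Int.ofNat_eq_natCast, PySem.List.pyGetD_natCast]
          simp [List.getD, List.getElem?_append_left hlt]
        have e : 2*i+2 = 2*(i+1) := by omega
        rw [this, e, (flatMap_pair_getD cs (i+1) h).1, hsucc, dif_pos h,
            List.getD_eq_getElem cs 0 h]
      · -- last gene wraps to the first
        have hi' : 2*i+2 = (cs.flatMap gce_pair).length := by omega
        have : PySem.List.pyGetD (cs.flatMap gce_pair ++ [PySem.List.pyGetD (cs.flatMap gce_pair) 0 0])
            (Int.ofNat (2*i+2)) 0 = PySem.List.pyGetD (cs.flatMap gce_pair) 0 0 := by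
          simp only [Int.ofNat_eq_natCast, PySem.List.pyGetD_natCast]
          rw [hi']
          simp [List.getD]
        rw [this, hgetD0, hsucc, dif_neg h, List.getD_eq_getElem cs 0 hn]

lemma gce_fold (gs : List (List Int)) (h : ∀ c ∈ gs, c ≠ []) : ∀ edges : List (Int × Int),
    gs.foldl (fun edges chromosome =>
      let nodes := transfer_chromosome_to_cycle chromosome
      let nodes2 := nodes ++ [PySem.List.pyGetD nodes 0 0]
      (List.range chromosome.length).foldl (fun edges i =>
        edges ++ [(PySem.List.pyGetD nodes2 (Int.ofNat (2*i+1)) 0,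
                   PySem.List.pyGetD nodes2 (Int.ofNat (2*i+2)) 0)]) edges) edges
    = gs.foldl (fun edges chromosome =>
      edges ++
        ((chromosome.zip
            (PySem.List.slice chromosome (some 1) none ++ PySem.List.slice chromosome none (some 1))).map
          (fun p => (gce_tail p.1, gce_head p.2)))) edges := by
  induction gs with
  | nil => intro edges; rfl
  | cons cs gs ih =>
    intro edges
    have hcs : cs ≠ [] := h cs (by simp)
    have h' : ∀ c ∈ gs, c ≠ [] := fun c hc => h c (by simp [hc])
    simp only [List.foldl_cons]
    rw [chrom_eq cs hcs edges]
    exact ih h' _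

-- ===== VERDICT (by name: the statement is the Claim_ definition above) =====
theorem get_colored_edges_spec : Claim_equal_get_colored_edges := by
  intro genome _ hpre
  unfold Spec_get_colored_edges get_colored_edges get_colored_edges_alt
  exact gce_fold genome hpre []
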